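-- pv_equiv track=rewrite | github.com/rtelesko/Python-Example-Apps | lottery_numbers.py | has_identical_tips
-- ===== SOURCE A (Python) =====
-- def has_identical_tips(list_of_tips):
--     """
--     Checks if any two lists in a collection have the same elements, regardless of order.
--     """
--     seen = set()
--
--     for current_list in list_of_tips:
--         # Sort the list to handle different element orders
--         sorted_tuple = tuple(sorted(current_list))
--
--         # Check if this normalized version has been seen before
--         if sorted_tuple in seen:
--             return True
--
--         # Add the normalized version to the set
--         seen.add(sorted_tuple)
--
--     return False
-- ===== SOURCE B (Python) =====
-- def has_identical_tips(list_of_tips):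
--     """
--     Checks if any two lists in a collection have the same elements, regardless of order.
--     Sort-then-adjacent-scan: normalize each tip by sorting it, sort the list of
--     normalized keys, and report True iff two neighbouring keys are equal.
--     """
--     keys = sorted(sorted(t) for t in list_of_tips)
--     for i in range(1, len(keys)):
--         if keys[i - 1] == keys[i]:
--             return True
--     return False
-- ===== Notes on version B (the rewrite author's own statement) =====
-- stated objective: alternative
-- what changed: Replaces incremental hash-set membership with sort-the-normalized-keys then a single adjacent-equality scan.
import Mathlib
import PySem

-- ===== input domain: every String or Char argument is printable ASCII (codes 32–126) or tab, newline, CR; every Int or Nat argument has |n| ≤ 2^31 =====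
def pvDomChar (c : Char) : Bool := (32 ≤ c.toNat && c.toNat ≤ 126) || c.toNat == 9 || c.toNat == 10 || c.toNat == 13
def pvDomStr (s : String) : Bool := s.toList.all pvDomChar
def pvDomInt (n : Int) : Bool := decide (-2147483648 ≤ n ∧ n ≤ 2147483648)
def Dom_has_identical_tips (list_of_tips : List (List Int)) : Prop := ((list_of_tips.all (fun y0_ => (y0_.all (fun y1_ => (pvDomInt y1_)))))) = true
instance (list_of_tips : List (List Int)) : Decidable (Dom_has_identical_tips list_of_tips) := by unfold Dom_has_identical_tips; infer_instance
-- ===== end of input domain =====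

-- B replaces A's incremental set-membership loop by sort-the-keys + adjacent scan (alternative decomposition, same result).

-- ===== PORT A =====
-- the for-loop over list_of_tips with early 'return True', carrying 'seen'
def hitA_go : List (List Int) → PySem.Set (List Int) → Bool
  | [], _ => false
  | current_list :: rest, seen =>
      let sorted_tuple := PySem.List.sorted current_list (fun x => x) false
      if PySem.Set.contains seen sorted_tuple then true
      else hitA_go rest (PySem.Set.add seen sorted_tuple)

def has_identical_tips (list_of_tips : List (List Int)) : Bool :=
  hitA_go list_of_tips (PySem.Set.empty)

-- ===== PORT B =====
-- the 'for i in range(1, len(keys))' adjacent-equality scan with early 'return True'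
def hitB_scan : List (List Int) → Bool
  | a :: b :: rest => a == b || hitB_scan (b :: rest)
  | _ => false

def has_identical_tips_alt (list_of_tips : List (List Int)) : Bool :=
  let keys := list_of_tips.map (fun t => PySem.List.sorted t (fun x => x) false)
  hitB_scan (PySem.List.sorted keys (fun x => x) false)

-- ===== PRECONDITION & SPEC =====
def Spec_has_identical_tips (list_of_tips : List (List Int)) (out : Bool) : Prop := out = has_identical_tips_alt list_of_tips
instance (list_of_tips : List (List Int)) (out : Bool) : Decidable (Spec_has_identical_tips list_of_tips out) := by unfold Spec_has_identical_tips; infer_instance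

-- ===== CLAIM (what is proved, stated in full; the proofs are below) =====
def Claim_equal_has_identical_tips : Prop := ∀ (list_of_tips : List (List Int)), Dom_has_identical_tips list_of_tips → Spec_has_identical_tips list_of_tips (has_identical_tips list_of_tips)

-- ===== LEMMAS AND PROOFS =====

-- the two LT/DecidableLT instance bundles on List Int give the same sort
theorem sorted_keys_inst (keys : List (List Int)) :
    (PySem.List.sorted keys (fun x => x) false : List (List Int)) =
      @PySem.List.sorted (List Int) (List Int) List.instLinearOrder.toLT
        LinearOrder.toDecidableLT keys (fun x => x) false := by
  congr 1

-- A's loop returns False iff the normalized keys are pairwise distinct and none is already in 'seen'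
theorem hitA_go_eq_false_iff (tips : List (List Int)) (seen : PySem.Set (List Int)) :
    hitA_go tips seen = false ↔
      (tips.map (fun t => PySem.List.sorted t (fun x => x) false)).Nodup ∧
      ∀ k ∈ tips.map (fun t => PySem.List.sorted t (fun x => x) false), k ∉ seen := by
  induction tips generalizing seen with
  | nil => simp [hitA_go]
  | cons cur rest ih =>
    have hmap : (cur :: rest).map (fun t => PySem.List.sorted t (fun x => x) false)
        = PySem.List.sorted cur (fun x => x) false
            :: rest.map (fun t => PySem.List.sorted t (fun x => x) false) := rfl
    rw [hmap]
    by_cases h : PySem.List.sorted cur (fun x => x) false ∈ seen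
    · have hc : PySem.Set.contains seen (PySem.List.sorted cur (fun x => x) false) = true := by
        simp [PySem.Set.contains, h]
      rw [show hitA_go (cur :: rest) seen = true by simp [hitA_go]; exact Or.inl h]
      constructor
      · intro hfalse; cases hfalse
      · rintro ⟨-, hall⟩
        exact absurd h (hall _ (List.mem_cons_self))
    · have hc : PySem.Set.contains seen (PySem.List.sorted cur (fun x => x) false) = false := by
        simp [PySem.Set.contains, h]
      rw [show hitA_go (cur :: rest) seen
            = hitA_go rest (PySem.Set.add seen (PySem.List.sorted cur (fun x => x) false)) by
          simp [hitA_go]; intro hmem; exact absurd hmem h]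
      rw [ih]
      constructor
      · rintro ⟨hnd, hall⟩
        refine ⟨List.nodup_cons.2 ⟨?_, hnd⟩, ?_⟩
        · intro hmem
          have := hall _ hmem
          exact this ((PySem.Set.mem_add _ _ _).2 (Or.inr rfl))
        · intro k hk
          rcases List.mem_cons.1 hk with rfl | hk'
          · exact h
          · intro hkseen
            exact hall _ hk' ((PySem.Set.mem_add _ _ _).2 (Or.inl hkseen))
      · rintro ⟨hnd, hall⟩
        rcases List.nodup_cons.1 hnd with ⟨hnotin, hnd'⟩
        refine ⟨hnd', ?_⟩
        intro k hk hkadd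
        rcases (PySem.Set.mem_add _ _ _).1 hkadd with hkseen | rfl
        · exact hall _ (List.mem_cons_of_mem _ hk) hkseen
        · exact hnotin hk

-- on a ≤-sorted list, an equal adjacent pair exists iff the list has a duplicate
theorem hitB_scan_sorted (l : List (List Int)) (hp : l.Pairwise (· ≤ ·)) :
    hitB_scan l = !decide l.Nodup := by
  induction l with
  | nil => simp [hitB_scan]
  | cons a t ih =>
    cases t with
    | nil => simp [hitB_scan]
    | cons b r =>
      have hp' : (b :: r).Pairwise (· ≤ ·) := hp.of_cons
      have hab : a ≤ b := (List.pairwise_cons.1 hp).1 b List.mem_cons_self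
      by_cases hEq : a = b
      · subst hEq
        simp [hitB_scan]
      · have hnotin : a ∉ b :: r := by
          intro hmem
          rcases List.mem_cons.1 hmem with heq | hr
          · exact hEq heq
          · have hba : b ≤ a := (List.pairwise_cons.1 hp').1 a hr
            exact hEq (le_antisymm hab hba)
        have hs : hitB_scan (a :: b :: r) = hitB_scan (b :: r) := by
          simp [hitB_scan, hEq]
        rw [hs, ih hp']
        simp [List.nodup_cons, hnotin]

-- ===== VERDICT (by name: the statement is the Claim_ definition above) =====
theorem has_identical_tips_spec : Claim_equal_has_identical_tips := by
  intro tips _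
  unfold Spec_has_identical_tips has_identical_tips has_identical_tips_alt
  set keys := tips.map (fun t => PySem.List.sorted t (fun x => x) false) with hkeys
  have hB : hitB_scan (PySem.List.sorted keys (fun x => x) false) = !decide keys.Nodup := by
    rw [sorted_keys_inst]
    have hperm : (@PySem.List.sorted (List Int) (List Int) List.instLinearOrder.toLT
        LinearOrder.toDecidableLT keys (fun x => x) false).Perm keys := by
      rw [← sorted_keys_inst]
      exact PySem.List.sorted_perm keys (fun x => x) false
    rw [hitB_scan_sorted _ (PySem.List.sorted_pairwise keys (fun x => x))]
    rw [decide_eq_decide.2 hperm.nodup_iff]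
  have hA : hitA_go tips PySem.Set.empty = !decide keys.Nodup := by
    by_cases h : keys.Nodup
    · have hzero : hitA_go tips PySem.Set.empty = false := by
        rw [hitA_go_eq_false_iff]
        refine ⟨h, ?_⟩
        intro k _ hk
        simp [PySem.Set.empty] at hk
      rw [hzero, h |> decide_eq_true, Bool.not_true]
    · have hone : hitA_go tips PySem.Set.empty = true := by
        rcases Bool.eq_false_or_eq_true (hitA_go tips PySem.Set.empty) with ht | hf
        · exact ht
        · exact absurd ((hitA_go_eq_false_iff tips PySem.Set.empty).1 hf).1 h
      rw [hone, decide_eq_false h, Bool.not_false]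
  rw [hA, hB]
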